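-- pv_equiv track=rewrite | github.com/FernandoFH/CodeInterview | CodingInterview/reWritter/Prefix_hierarchy/main.py | prefix_hierarchy
-- ===== SOURCE A (Python) =====
-- def prefix_hierarchy(input_list, query):
--     """
--     input_list: list of strings
--     query: list of strings
--     output: list of int
--     """
--     output = []
--     counter = 0
--
--     for j in range(len(query)):
--         for i in range(len(input_list)):
--             if (input_list[i].startswith(query[j]) and  (len(input_list[i]) != len(query[j]))):
--                 counter += 1
--         output.append(counter)
--         counter = 0
--
--     return output
-- ===== SOURCE B (Python) =====
-- def prefix_hierarchy(input_list, query):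
--     # Build a counter of every proper prefix of every input string once,
--     # then answer each query by a single dictionary lookup.
--     counts = {}
--     for s in input_list:
--         for k in range(len(s)):
--             p = s[:k]
--             counts[p] = counts.get(p, 0) + 1
--     return [counts.get(q, 0) for q in query]
-- ===== Notes on version B (the rewrite author's own statement) =====
-- stated objective: faster
-- what changed: Instead of scanning the whole input list per query, B builds a hash counter of every proper prefix of every input string in one pass and answers each query by a single dictionary lookup.
import Mathlib
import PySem

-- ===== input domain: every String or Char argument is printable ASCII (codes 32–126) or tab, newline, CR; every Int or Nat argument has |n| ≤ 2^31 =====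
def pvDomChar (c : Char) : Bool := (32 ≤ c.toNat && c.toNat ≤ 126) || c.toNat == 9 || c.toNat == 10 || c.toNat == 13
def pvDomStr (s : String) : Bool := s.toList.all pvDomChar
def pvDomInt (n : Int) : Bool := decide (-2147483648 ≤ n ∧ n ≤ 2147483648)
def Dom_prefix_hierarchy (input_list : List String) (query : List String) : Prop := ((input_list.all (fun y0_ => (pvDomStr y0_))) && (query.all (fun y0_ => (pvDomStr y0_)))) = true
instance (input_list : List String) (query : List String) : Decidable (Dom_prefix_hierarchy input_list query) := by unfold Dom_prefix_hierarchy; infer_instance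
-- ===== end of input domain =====

-- B replaces A's per-query scan of the whole input list by a counter of all proper prefixes built once, answering each query by one lookup.

-- ===== PORT A =====
def prefix_hierarchy (input_list : List String) (query : List String) : List Int :=
  (((PySem.List.pyRange 0 (PySem.List.len query)).foldl
    (fun (st : List Int × Int) j =>
      let counter :=
        (PySem.List.pyRange 0 (PySem.List.len input_list)).foldl
          (fun (c : Int) i =>
            if PySem.Str.startswith (PySem.List.pyGetD input_list i "") (PySem.List.pyGetD query j "")
               && (PySem.Str.len (PySem.List.pyGetD input_list i "") != PySem.Str.len (PySem.List.pyGetD query j ""))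
            then c + 1 else c)
          st.2
      (st.1 ++ [counter], 0))
    ([], 0))).1

-- ===== PORT B =====
def prefix_hierarchy_alt (input_list : List String) (query : List String) : List Int :=
  let counts : PySem.Dict String Int :=
    input_list.foldl
      (fun d s =>
        (PySem.List.pyRange 0 (PySem.Str.len s)).foldl
          (fun d k => d.modify (PySem.Str.slice s none (some k)) 0 (· + 1)) d)
      PySem.Dict.empty
  query.map (fun q => counts.getD q 0)

-- ===== PRECONDITION & SPEC =====
def Spec_prefix_hierarchy (input_list : List String) (query : List String) (out : List Int) : Prop := out = prefix_hierarchy_alt input_list query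
instance (input_list : List String) (query : List String) (out : List Int) : Decidable (Spec_prefix_hierarchy input_list query out) := by unfold Spec_prefix_hierarchy; infer_instance

-- ===== CLAIM (what is proved, stated in full; the proofs are below) =====
def Claim_equal_prefix_hierarchy : Prop := ∀ (input_list : List String) (query : List String), Dom_prefix_hierarchy input_list query → Spec_prefix_hierarchy input_list query (prefix_hierarchy input_list query)

-- ===== LEMMAS AND PROOFS =====

-- the k-th slice s[:k] of s, as a list of characters, is take k
theorem pv_toList_slice_nat (s : String) (k : Nat) :
    (PySem.Str.slice s none (some (k : Int))).toList = s.toList.take k := by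
  simp [PySem.Str.toList_slice, PySem.Chars.slice_eq_listSlice, PySem.List.slice_to_natCast]

-- how often q appears among the proper prefixes of s
theorem pv_count_prefixes (s q : String) :
    List.count q ((PySem.List.pyRange 0 (PySem.Str.len s)).map
      (fun k => PySem.Str.slice s none (some k)))
    = if PySem.Str.startswith s q && (PySem.Str.len s != PySem.Str.len q) then 1 else 0 := by
  have hcnt : List.count q ((PySem.List.pyRange 0 (PySem.Str.len s)).map
      (fun k => PySem.Str.slice s none (some k)))
      = List.countP (fun i => decide (s.toList.take i = q.toList)) (List.range s.toList.length) := by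
    rw [PySem.Str.len_eq, PySem.List.pyRange_zero_natCast, List.map_map]
    simp only [List.count, List.countP_map]
    apply List.countP_congr
    intro i _
    simp only [Function.comp, beq_iff_eq, decide_eq_true_eq]
    constructor
    · intro h
      rw [← pv_toList_slice_nat s i, h]
    · intro h
      apply String.toList_inj.mp
      rw [pv_toList_slice_nat s i, h]
  rw [hcnt]
  have hcond : (PySem.Str.startswith s q && (PySem.Str.len s != PySem.Str.len q)) = true
      ↔ (q.toList <+: s.toList ∧ q.toList.length < s.toList.length) := by
    simp only [Bool.and_eq_true, PySem.Str.startswith_eq, PySem.Chars.startswith_iff,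
      PySem.Str.len_eq, bne_iff_ne, ne_eq, Int.natCast_inj]
    constructor
    · rintro ⟨hp, hne⟩
      exact ⟨hp, lt_of_le_of_ne hp.length_le (fun h => hne h.symm)⟩
    · rintro ⟨hp, hlt⟩
      exact ⟨hp, fun h => absurd h.symm (Nat.ne_of_lt hlt)⟩
  by_cases h : q.toList <+: s.toList ∧ q.toList.length < s.toList.length
  · rw [if_pos (hcond.mpr h)]
    rw [List.countP_congr (q := fun i => i == q.toList.length) ?_]
    · show List.count q.toList.length (List.range s.toList.length) = 1
      exact List.count_eq_one_of_mem (List.nodup_range) (List.mem_range.mpr h.2)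
    · intro i hi
      rw [List.mem_range] at hi
      simp only [decide_eq_true_eq, beq_iff_eq]
      constructor
      · intro ht
        have := congrArg List.length ht
        rw [List.length_take, Nat.min_eq_left (Nat.le_of_lt hi)] at this
        exact this
      · intro hiq
        subst hiq
        exact (List.prefix_iff_eq_take.mp h.1).symm
  · rw [if_neg (fun hb => h (hcond.mp hb))]
    rw [List.countP_eq_zero]
    intro i hi
    rw [List.mem_range] at hi
    simp only [decide_eq_true_eq]
    intro ht
    apply h
    constructor
    · rw [← ht]; exact List.take_prefix i s.toList
    · have := congrArg List.length ht
      rw [List.length_take, Nat.min_eq_left (Nat.le_of_lt hi)] at this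
      omega

-- the prefix counter after processing input_list
theorem pv_B_getD (input_list : List String) (q : String) (d : PySem.Dict String Int) :
    (input_list.foldl
      (fun d s =>
        (PySem.List.pyRange 0 (PySem.Str.len s)).foldl
          (fun d k => d.modify (PySem.Str.slice s none (some k)) 0 (· + 1)) d)
      d).getD q 0
    = d.getD q 0 + (List.countP
        (fun s => PySem.Str.startswith s q && (PySem.Str.len s != PySem.Str.len q)) input_list : Int) := by
  induction input_list generalizing d with
  | nil => simp
  | cons s tl ih =>
    rw [List.foldl_cons, ih, List.countP_cons]
    have hF : ((PySem.List.pyRange 0 (PySem.Str.len s)).foldl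
        (fun d k => d.modify (PySem.Str.slice s none (some k)) 0 (· + 1)) d).getD q 0
        = d.getD q 0 + (List.count q ((PySem.List.pyRange 0 (PySem.Str.len s)).map
            (fun k => PySem.Str.slice s none (some k))) : Int) := by
      rw [← List.foldl_map (f := fun k => PySem.Str.slice s none (some k))
          (g := fun d x => PySem.Dict.modify d x 0 (· + 1))]
      exact PySem.Dict.getD_foldl_modify_add_one _ _ _
    rw [hF, pv_count_prefixes]
    split_ifs <;> push_cast <;> omega

-- the outer append-and-reset loop of A produces the map of its per-query counts
theorem pv_A_outer (c : String → Int) (qs : List String) (out : List Int) :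
    (qs.foldl (fun (st : List Int × Int) x => (st.1 ++ [st.2 + c x], 0)) (out, 0)).1
    = out ++ qs.map c := by
  induction qs generalizing out with
  | nil => simp
  | cons x tl ih =>
    simp only [List.foldl_cons, List.map_cons]
    rw [ih]
    simp

-- ===== VERDICT (by name: the statement is the Claim_ definition above) =====
theorem prefix_hierarchy_spec : Claim_equal_prefix_hierarchy := by
  intro il q _
  show prefix_hierarchy il q = prefix_hierarchy_alt il q
  have hB : prefix_hierarchy_alt il q = q.map (fun x =>
      (List.countP (fun s => PySem.Str.startswith s x && (PySem.Str.len s != PySem.Str.len x)) il : Int)) := by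
    unfold prefix_hierarchy_alt
    refine List.map_congr_left ?_
    intro x _
    rw [pv_B_getD il x PySem.Dict.empty, PySem.Dict.getD_empty, zero_add]
  have hA : prefix_hierarchy il q = q.map (fun x =>
      (List.countP (fun s => PySem.Str.startswith s x && (PySem.Str.len s != PySem.Str.len x)) il : Int)) := by
    unfold prefix_hierarchy
    rw [PySem.List.foldl_pyRange_pyGetD q ""
      (fun (st : List Int × Int) (x : String) =>
        let counter :=
          (PySem.List.pyRange 0 (PySem.List.len il)).foldl
            (fun (c : Int) i =>
              if PySem.Str.startswith (PySem.List.pyGetD il i "") x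
                 && (PySem.Str.len (PySem.List.pyGetD il i "") != PySem.Str.len x)
              then c + 1 else c)
            st.2
        (st.1 ++ [counter], 0)) ([], 0) le_rfl]
    simp only [Int.toNat_zero, List.drop_zero]
    have hFG : (fun (st : List Int × Int) (x : String) =>
        (st.1 ++ [(PySem.List.pyRange 0 (PySem.List.len il)).foldl
            (fun (c : Int) i =>
              if PySem.Str.startswith (PySem.List.pyGetD il i "") x
                 && (PySem.Str.len (PySem.List.pyGetD il i "") != PySem.Str.len x)
              then c + 1 else c)
            st.2], (0 : Int)))
        = (fun (st : List Int × Int) (x : String) =>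
            (st.1 ++ [st.2 + (List.countP
              (fun s => PySem.Str.startswith s x && (PySem.Str.len s != PySem.Str.len x)) il : Int)], (0 : Int))) := by
      funext st x
      rw [PySem.List.foldl_pyRange_pyGetD il ""
        (fun (c : Int) (s : String) =>
          if PySem.Str.startswith s x && (PySem.Str.len s != PySem.Str.len x) then c + 1 else c)
        st.2 le_rfl]
      simp only [Int.toNat_zero, List.drop_zero]
      rw [PySem.List.foldl_count_if]
    refine Eq.trans (congrArg (fun f => (List.foldl f (([] : List Int), (0 : Int)) q).1) hFG) ?_
    beta_reduce
    rw [pv_A_outer]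
    simp
  rw [hA, hB]
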